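-- pv_equiv track=rewrite | github.com/giuseppeambrosio97/competitive_programming | python/leetcode/1434.py | numberWays
-- ===== SOURCE A (Python) =====
-- from collections import defaultdict
-- from functools import lru_cache
-- from typing import List
--
-- def numberWays(hats: List[List[int]]) -> int:
--     MOD = 10**9+7
--     mapping = defaultdict(list)
--     for person, person_hats in enumerate(hats):
--         for hat in person_hats:
--             mapping[hat].append(person)
--     mapping = list(mapping.items())
--     TARGET_MASK = (1 << len(hats)) - 1
--     @lru_cache(maxsize=None)
--     def dfs(hatid: int, mask: int):
--         if mask == TARGET_MASK:
--             return 1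
--         if hatid >= len(mapping):
--             return 0
--         tmp = 0
--         tmp += dfs(hatid+1, mask) # don't take the hat with hatid
--         for i in mapping[hatid][1]:
--             if mask & (1<<i):
--                 continue
--             tmp += dfs(hatid+1, mask | (1<<i))
--         return tmp % MOD
--     return dfs(0,0)
-- ===== SOURCE B (Python) =====
-- def numberWays(hats):
--     MOD = 10 ** 9 + 7
--     mapping = {}
--     for person, person_hats in enumerate(hats):
--         for hat in person_hats:
--             mapping[hat] = mapping.get(hat, []) + [person]
--     n = len(hats)
--     size = 1 << n
--     target = size - 1
--     dp = [1 if m == target else 0 for m in range(size)]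
--     for persons in reversed(list(mapping.values())):
--         new_dp = []
--         for mask in range(size):
--             if mask == target:
--                 new_dp.append(1)
--                 continue
--             t = dp[mask]
--             for p in persons:
--                 if mask & (1 << p) == 0:
--                     t += dp[mask | (1 << p)]
--             new_dp.append(t % MOD)
--         dp = new_dp
--     return dp[0]
-- ===== Notes on version B (the rewrite author's own statement) =====
-- stated objective: alternative
-- what changed: Replaced A's lru_cache-memoized top-down recursion dfs(hatid, mask) by bottom-up tabulation: a dp table over all 2^n person-masks seeded at the full mask, updated layer by layer for each hat from last to first, returning dp[0].
import Mathlib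
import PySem

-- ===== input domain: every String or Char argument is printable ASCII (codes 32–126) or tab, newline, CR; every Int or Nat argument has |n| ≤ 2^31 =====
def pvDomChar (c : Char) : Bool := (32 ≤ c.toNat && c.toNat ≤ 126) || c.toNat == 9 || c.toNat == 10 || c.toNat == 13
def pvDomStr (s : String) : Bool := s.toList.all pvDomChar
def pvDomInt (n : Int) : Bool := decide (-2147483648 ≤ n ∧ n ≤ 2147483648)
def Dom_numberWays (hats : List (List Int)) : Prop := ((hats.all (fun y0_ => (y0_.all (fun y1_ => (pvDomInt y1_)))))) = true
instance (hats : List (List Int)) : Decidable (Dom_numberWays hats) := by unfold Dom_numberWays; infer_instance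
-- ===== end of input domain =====

-- B replaces A's memoized top-down recursion over (hat index, mask) by bottom-up tabulation:
-- one dp table of size 2^n over person-masks, updated per hat from last to first (alternative
-- decomposition, similar cost).

-- ===== PORT A =====
-- both Pythons build the same hat -> persons mapping with this double loop
def buildMapping (hats : List (List Int)) : PySem.Dict Int (List Int) :=
  (PySem.List.enumerate hats 0).foldl
    (fun d pe => pe.2.foldl (fun d hat => d.modify hat [] (· ++ [pe.1])) d)
    PySem.Dict.empty

-- dfs(hatid, mask): recursion on the suffix of `mapping` from hatid on; `1 << i` for the
-- nonnegative person index i is ported as `1 <<< i.toNat` (exact for i ≥ 0)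
def dfsA (MOD TARGET : Int) : List (Int × List Int) → Int → Int
  | [], mask => if mask = TARGET then 1 else 0
  | (_, ps) :: rest, mask =>
    if mask = TARGET then 1
    else
      let tmp := dfsA MOD TARGET rest mask
      let tmp := ps.foldl
        (fun tmp i =>
          if PySem.Int.band mask (1 <<< i.toNat) ≠ 0 then tmp
          else tmp + dfsA MOD TARGET rest (PySem.Int.bor mask (1 <<< i.toNat))) tmp
      PySem.Int.mod tmp MOD

def numberWays (hats : List (List Int)) : Int :=
  let MOD : Int := 10 ^ 9 + 7
  let mapping := (buildMapping hats).items
  let TARGET : Int := (1 <<< hats.length) - 1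
  dfsA MOD TARGET mapping 0

-- ===== PORT B =====
-- one layer of the tabulation: new_dp built mask by mask from the previous dp
def stepB (MOD : Int) (size target : Nat) (dp : List Int) (persons : List Int) : List Int :=
  (List.range size).map (fun mask =>
    if mask = target then (1 : Int)
    else
      let t := dp.getD mask 0
      let t := persons.foldl
        (fun t p =>
          if PySem.Int.band (mask : Int) (1 <<< p.toNat) = 0 then
            t + dp.getD (PySem.Int.bor (mask : Int) (1 <<< p.toNat)).toNat 0
          else t) t
      PySem.Int.mod t MOD)

def numberWays_alt (hats : List (List Int)) : Int :=
  let MOD : Int := 10 ^ 9 + 7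
  let mapping := buildMapping hats
  let n := hats.length
  let size := 1 <<< n
  let target := size - 1
  let dp0 : List Int := (List.range size).map (fun m => if m = target then (1 : Int) else 0)
  let dp := (mapping.values.reverse).foldl (stepB MOD size target) dp0
  dp.getD 0 0

-- ===== PRECONDITION & SPEC =====
def Spec_numberWays (hats : List (List Int)) (out : Int) : Prop := out = numberWays_alt hats
instance (hats : List (List Int)) (out : Int) : Decidable (Spec_numberWays hats out) := by unfold Spec_numberWays; infer_instance

-- ===== CLAIM (what is proved, stated in full; the proofs are below) =====
def Claim_equal_numberWays : Prop := ∀ (hats : List (List Int)), Dom_numberWays hats → Spec_numberWays hats (numberWays hats)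

-- ===== LEMMAS AND PROOFS =====

-- every person index stored in the mapping comes from `enumerate hats`, hence is some k < len hats
theorem foldl_nested_flat (l : List (Int × List Int)) (d : PySem.Dict Int (List Int)) :
    l.foldl (fun d pe => pe.2.foldl (fun d hat => d.modify hat [] (· ++ [pe.1])) d) d
      = (l.flatMap (fun pe => pe.2.map (fun hat => (hat, pe.1)))).foldl
          (fun d q => d.modify q.1 [] (· ++ [q.2])) d := by
  induction l generalizing d with
  | nil => rfl
  | cons pe rest ih =>
    simp only [List.foldl_cons, List.flatMap_cons, List.foldl_append, List.foldl_map]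
    exact ih _

theorem buildMapping_persons (hats : List (List Int)) :
    ∀ pr ∈ (buildMapping hats).items, ∀ p ∈ pr.2, ∃ k : Nat, k < hats.length ∧ p = (k : Int) := by
  intro pr hpr p hp
  have hflat := foldl_nested_flat (PySem.List.enumerate hats 0) PySem.Dict.empty
  set flat := (PySem.List.enumerate hats 0).flatMap (fun pe => pe.2.map (fun hat => (hat, pe.1))) with hfl
  have hnd : ((buildMapping hats)).keys.Nodup := by
    rw [buildMapping, hflat]
    exact PySem.Dict.nodup_keys_foldl_modify_key flat Prod.fst [] (fun _ q => (· ++ [q.2]))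
      PySem.Dict.empty PySem.Dict.nodup_keys_empty
  have hitems := PySem.Dict.items_eq_map_keys (buildMapping hats) hnd ([] : List Int)
  rw [hitems] at hpr
  obtain ⟨k0, hk0, rfl⟩ := List.mem_map.mp hpr
  have hgetD : (buildMapping hats).getD k0 [] = (flat.filter (fun q => q.1 == k0)).map (·.2) := by
    rw [buildMapping, hflat, PySem.Dict.getD_foldl_modify_append, PySem.Dict.getD_empty]
    simp
  simp only [hgetD] at hp
  obtain ⟨q, hq, rfl⟩ := List.mem_map.mp hp
  have hqf : q ∈ flat := List.mem_of_mem_filter hq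
  obtain ⟨pe, hpe, hqm⟩ := List.mem_flatMap.mp hqf
  obtain ⟨hat, _, rfl⟩ := List.mem_map.mp hqm
  obtain ⟨k, hk, rfl⟩ := (PySem.List.mem_enumerate_iff _ _ _).mp hpe
  exact ⟨k, hk, by simp⟩

-- the dp table after processing the reversed value lists of a suffix `its` of the mapping
-- tabulates exactly dfsA on that suffix
theorem dp_layers (M : Int) (n : Nat) (its : List (Int × List Int))
    (hps : ∀ pr ∈ its, ∀ p ∈ pr.2, ∃ k : Nat, k < n ∧ p = (k : Int)) :
    ((its.map (·.2)).reverse).foldl (stepB M (2 ^ n) (2 ^ n - 1))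
        ((List.range (2 ^ n)).map (fun m => if m = 2 ^ n - 1 then (1 : Int) else 0))
      = (List.range (2 ^ n)).map (fun (m : Nat) => dfsA M ((2 ^ n : Nat) - 1 : Nat) its (m : Int)) := by
  induction its with
  | nil =>
    simp only [List.map_nil, List.reverse_nil, List.foldl_nil]
    apply List.map_congr_left
    intro m _
    by_cases h : m = 2 ^ n - 1
    · subst h; simp [dfsA]
    · have h2 : (m : Int) ≠ (2 : Int) ^ n - 1 := by
        intro he
        apply h
        have hm1 : ((m : Int)) + 1 = (2 : Int) ^ n := by linarith
        have hm2 : m + 1 = 2 ^ n := by exact_mod_cast hm1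
        omega
      simp [dfsA, h, h2]
  | cons pr rest ih =>
    obtain ⟨key, ps⟩ := pr
    have hps' : ∀ pr ∈ rest, ∀ p ∈ pr.2, ∃ k : Nat, k < n ∧ p = (k : Int) :=
      fun pr h => hps pr (List.mem_cons_of_mem _ h)
    have hpshead : ∀ p ∈ ps, ∃ k : Nat, k < n ∧ p = (k : Int) :=
      fun p h => hps (key, ps) (by simp) p h
    simp only [List.map_cons, List.reverse_cons]
    rw [List.foldl_append, ih hps']
    simp only [List.foldl_cons, List.foldl_nil, stepB]
    apply List.map_congr_left
    intro m hm
    have hmlt : m < 2 ^ n := List.mem_range.mp hm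
    by_cases hmt : m = 2 ^ n - 1
    · subst hmt; simp [dfsA]
    · have hmt' : (m : Int) ≠ ((2 ^ n - 1 : Nat) : Int) := by exact_mod_cast hmt
      rw [if_neg hmt]
      simp only [dfsA]
      rw [if_neg hmt']
      rw [PySem.List.getD_map_range _ _ _ _ hmlt]
      congr 1
      apply PySem.List.foldl_congr_mem
      intro acc p hpmem
      obtain ⟨k, hk, rfl⟩ := hpshead p hpmem
      have hor : m ||| 2 ^ k < 2 ^ n :=
        Nat.bitwise_lt_two_pow hmlt (Nat.pow_lt_pow_right one_lt_two hk)
      simp only [Nat.one_shiftLeft, PySem.Int.band_natCast, PySem.Int.bor_natCast,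
        Int.toNat_natCast]
      rw [PySem.List.getD_map_range _ _ _ _ hor]
      by_cases hb : m &&& 2 ^ k = 0
      · simp [hb]
      · simp [hb]

-- ===== VERDICT (by name: the statement is the Claim_ definition above) =====
theorem numberWays_spec : Claim_equal_numberWays := by
  intro hats _
  unfold Spec_numberWays numberWays numberWays_alt
  simp only [PySem.Dict.values, Nat.one_shiftLeft]
  have htgt : ((2 ^ hats.length : Nat) : Int) - 1 = ((2 ^ hats.length - 1 : Nat) : Int) := by
    have := Nat.one_le_two_pow (n := hats.length)
    push_cast [this]; ring
  rw [htgt, dp_layers (10 ^ 9 + 7) hats.length (buildMapping hats).items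
        (buildMapping_persons hats)]
  rw [PySem.List.getD_map_range _ _ _ _ (Nat.two_pow_pos hats.length : 0 < 2 ^ hats.length)]
  norm_num
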